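-- pv_equiv track=rewrite | github.com/oliveirasamuel03-jpg/robo-investimentos | core/strategy_structure_audit.py | _audit_notes
-- ===== SOURCE A (Python) =====
-- from typing import Any
--
-- def _audit_notes(comparison: list[dict[str, Any]]) -> dict[str, str]:
--     dominant_blockers = [str(row.get("dominant_blocker") or "") for row in comparison]
--     blocker_blob = " ".join(dominant_blockers).lower()
--     reversal_row = next((row for row in comparison if str(row.get("setup")) == "reversal_v_pattern"), {})
--
--     if "trend_not_confirmed" in blocker_blob or "countertrend" in blocker_blob:
--         timeframe_note = (
--             "Possivel gargalo de temporalidade/tendencia: o diario pode estar atrasado ou divergente. "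
--             "Diagnostico inconclusivo sem multi-timeframe ativo."
--         )
--     else:
--         timeframe_note = "Sem evidencia forte de gargalo exclusivo de temporalidade neste ciclo."
--
--     if any(token in blocker_blob for token in ("rsi", "momentum", "confidence_too_low", "reversal_not_eligible")):
--         rsi_momentum_note = (
--             "RSI/momentum aparecem entre os bloqueadores estruturais; observar se sao marginais ou primarios "
--             "antes de qualquer ajuste."
--         )
--     else:
--         rsi_momentum_note = "Sem evidencia forte de que RSI/momentum expliquem sozinhos a rejeicao estrutural."
--
--     if int(reversal_row.get("shadow_candidates", 0) or 0) > 0: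
--         reversal_note = (
--             "Reversal v-pattern apareceu como candidato shadow. Pode merecer estudo complementar, "
--             "mas segue sem autoridade de trade."
--         )
--     else:
--         reversal_note = "Reversal v-pattern permanece bloqueado/inconclusivo; nao foi ativado como gatilho real."
--
--     return {
--         "structural_audit_timeframe_note": timeframe_note,
--         "structural_audit_rsi_momentum_note": rsi_momentum_note,
--         "structural_audit_reversal_note": reversal_note,
--     }
-- ===== SOURCE B (Python) =====
-- def _audit_notes(comparison):
--     # Single pass: per-row lowercased blocker checks OR-ed into flags, first
--     # reversal_v_pattern row captured in the same loop (tokens contain no space,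
--     # so the per-row check equals A's substring test on the space-joined blob).
--     trend_flag = False
--     rsi_flag = False
--     reversal_row = None
--     for row in comparison:
--         blob = str(row.get("dominant_blocker") or "").lower()
--         if not trend_flag and ("trend_not_confirmed" in blob or "countertrend" in blob):
--             trend_flag = True
--         if not rsi_flag and ("rsi" in blob or "momentum" in blob
--                             or "confidence_too_low" in blob or "reversal_not_eligible" in blob):
--             rsi_flag = True
--         if reversal_row is None and str(row.get("setup")) == "reversal_v_pattern":
--             reversal_row = row
--
--     if trend_flag:
--         timeframe_note = (
--             "Possivel gargalo de temporalidade/tendencia: o diario pode estar atrasado ou divergente. "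
--             "Diagnostico inconclusivo sem multi-timeframe ativo."
--         )
--     else:
--         timeframe_note = "Sem evidencia forte de gargalo exclusivo de temporalidade neste ciclo."
--
--     if rsi_flag:
--         rsi_momentum_note = (
--             "RSI/momentum aparecem entre os bloqueadores estruturais; observar se sao marginais ou primarios "
--             "antes de qualquer ajuste."
--         )
--     else:
--         rsi_momentum_note = "Sem evidencia forte de que RSI/momentum expliquem sozinhos a rejeicao estrutural."
--
--     if int((reversal_row or {}).get("shadow_candidates", 0) or 0) > 0:
--         reversal_note = (
--             "Reversal v-pattern apareceu como candidato shadow. Pode merecer estudo complementar, "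
--             "mas segue sem autoridade de trade."
--         )
--     else:
--         reversal_note = "Reversal v-pattern permanece bloqueado/inconclusivo; nao foi ativado como gatilho real."
--
--     return {
--         "structural_audit_timeframe_note": timeframe_note,
--         "structural_audit_rsi_momentum_note": rsi_momentum_note,
--         "structural_audit_reversal_note": reversal_note,
--     }
-- ===== Notes on version B (the rewrite author's own statement) =====
-- stated objective: alternative
-- what changed: A's three passes (list of blockers + space-join/lower into one blob searched repeatedly, plus a separate next() scan for the reversal row) are collapsed into a single loop that lowercases each row's blocker, OR-accumulates the two flags per row, and captures the first reversal_v_pattern row; correctness rests on the tokens containing no space, so the per-row substring test equals the joined-blob test.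
import Mathlib
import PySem

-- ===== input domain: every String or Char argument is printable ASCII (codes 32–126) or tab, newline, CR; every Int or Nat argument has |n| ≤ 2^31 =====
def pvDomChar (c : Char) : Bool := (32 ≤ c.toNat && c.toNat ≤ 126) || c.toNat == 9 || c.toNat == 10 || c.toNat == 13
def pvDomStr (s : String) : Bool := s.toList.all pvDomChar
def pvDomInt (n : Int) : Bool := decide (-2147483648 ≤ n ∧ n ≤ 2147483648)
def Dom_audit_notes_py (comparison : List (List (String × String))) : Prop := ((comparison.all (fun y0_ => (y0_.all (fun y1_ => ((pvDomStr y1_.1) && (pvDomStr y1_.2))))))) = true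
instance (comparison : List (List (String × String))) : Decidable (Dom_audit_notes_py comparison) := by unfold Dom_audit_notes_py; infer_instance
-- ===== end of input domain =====

-- B trades A's three scans (blocker list, space-joined lowercased blob, next() search)
-- for one loop that checks each row's lowercased blocker and captures the first reversal row.

-- str(row.get(k)) — a missing key is None, str(None) = "None"; string values print as themselves
def pyStrGet (row : List (String × String)) (k : String) : String :=
  match row.lookup k with
  | some s => s
  | none => "None"

-- str(row.get("dominant_blocker") or "") — missing key or empty string gives ""
def pyBlockerGet (row : List (String × String)) : String :=
  match row.lookup "dominant_blocker" with
  | some s => if s == "" then "" else s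
  | none => ""

-- int(row.get("shadow_candidates", 0) or 0); Pre_ excludes the ValueError case, where
-- PySem.Int.ofStr? is none and we fall back to 0 (both ports identically)
def pyShadowGet (row : List (String × String)) : Int :=
  match row.lookup "shadow_candidates" with
  | some s => if s == "" then 0 else (PySem.Int.ofStr? s).getD 0
  | none => 0

def isReversalRow (row : List (String × String)) : Bool :=
  pyStrGet row "setup" == "reversal_v_pattern"

-- ===== PORT A =====
def audit_notes_py (comparison : List (List (String × String))) : List (String × String) :=
  let dominant_blockers := comparison.map pyBlockerGet
  let blocker_blob := PySem.Str.lower (PySem.Str.join " " dominant_blockers)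
  let reversal_row := (comparison.find? isReversalRow).getD []
  let timeframe_note :=
    if PySem.Str.isIn "trend_not_confirmed" blocker_blob || PySem.Str.isIn "countertrend" blocker_blob then
      "Possivel gargalo de temporalidade/tendencia: o diario pode estar atrasado ou divergente. Diagnostico inconclusivo sem multi-timeframe ativo."
    else
      "Sem evidencia forte de gargalo exclusivo de temporalidade neste ciclo."
  let rsi_momentum_note :=
    if PySem.Str.isIn "rsi" blocker_blob || PySem.Str.isIn "momentum" blocker_blob
        || PySem.Str.isIn "confidence_too_low" blocker_blob || PySem.Str.isIn "reversal_not_eligible" blocker_blob then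
      "RSI/momentum aparecem entre os bloqueadores estruturais; observar se sao marginais ou primarios antes de qualquer ajuste."
    else
      "Sem evidencia forte de que RSI/momentum expliquem sozinhos a rejeicao estrutural."
  let reversal_note :=
    if pyShadowGet reversal_row > 0 then
      "Reversal v-pattern apareceu como candidato shadow. Pode merecer estudo complementar, mas segue sem autoridade de trade."
    else
      "Reversal v-pattern permanece bloqueado/inconclusivo; nao foi ativado como gatilho real."
  [("structural_audit_timeframe_note", timeframe_note),
   ("structural_audit_rsi_momentum_note", rsi_momentum_note),
   ("structural_audit_reversal_note", reversal_note)]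

-- ===== PORT B =====
-- loop state: (trend_flag, rsi_flag, reversal_row)
def auditStep (st : Bool × Bool × Option (List (String × String))) (row : List (String × String)) :
    Bool × Bool × Option (List (String × String)) :=
  let blob := PySem.Str.lower (pyBlockerGet row)
  let trend_flag :=
    st.1 || (PySem.Str.isIn "trend_not_confirmed" blob || PySem.Str.isIn "countertrend" blob)
  let rsi_flag :=
    st.2.1 || (PySem.Str.isIn "rsi" blob || PySem.Str.isIn "momentum" blob
      || PySem.Str.isIn "confidence_too_low" blob || PySem.Str.isIn "reversal_not_eligible" blob)
  let reversal_row :=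
    match st.2.2 with
    | some r => some r
    | none => if isReversalRow row then some row else none
  (trend_flag, rsi_flag, reversal_row)

def audit_notes_py_alt (comparison : List (List (String × String))) : List (String × String) :=
  let st := comparison.foldl auditStep (false, false, none)
  let timeframe_note :=
    if st.1 then
      "Possivel gargalo de temporalidade/tendencia: o diario pode estar atrasado ou divergente. Diagnostico inconclusivo sem multi-timeframe ativo."
    else
      "Sem evidencia forte de gargalo exclusivo de temporalidade neste ciclo."
  let rsi_momentum_note :=
    if st.2.1 then
      "RSI/momentum aparecem entre os bloqueadores estruturais; observar se sao marginais ou primarios antes de qualquer ajuste."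
    else
      "Sem evidencia forte de que RSI/momentum expliquem sozinhos a rejeicao estrutural."
  let reversal_note :=
    if pyShadowGet (st.2.2.getD []) > 0 then
      "Reversal v-pattern apareceu como candidato shadow. Pode merecer estudo complementar, mas segue sem autoridade de trade."
    else
      "Reversal v-pattern permanece bloqueado/inconclusivo; nao foi ativado como gatilho real."
  [("structural_audit_timeframe_note", timeframe_note),
   ("structural_audit_rsi_momentum_note", rsi_momentum_note),
   ("structural_audit_reversal_note", reversal_note)]

-- ===== PRECONDITION & SPEC =====
-- Pre_ excludes exactly the inputs on which A raises ValueError: a first reversal_v_pattern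
-- row whose non-empty "shadow_candidates" string is not accepted by int().
def Pre_audit_notes_py (comparison : List (List (String × String))) : Prop :=
  ((((comparison.find? isReversalRow).getD []).lookup "shadow_candidates").all
    (fun s => s == "" || (PySem.Int.ofStr? s).isSome)) = true
instance (comparison : List (List (String × String))) : Decidable (Pre_audit_notes_py comparison) := by unfold Pre_audit_notes_py; infer_instance
def pvWitness_audit_notes_py : (List (List (String × String))) :=
  [[("dominant_blocker", "Countertrend veto"), ("setup", "breakout")],
   [("setup", "reversal_v_pattern"), ("shadow_candidates", " 2 ")]]
def Spec_audit_notes_py (comparison : List (List (String × String))) (out : List (String × String)) : Prop := out = audit_notes_py_alt comparison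
instance (comparison : List (List (String × String))) (out : List (String × String)) : Decidable (Spec_audit_notes_py comparison out) := by unfold Spec_audit_notes_py; infer_instance

-- ===== CLAIM (what is proved, stated in full; the proofs are below) =====
def Claim_equal_audit_notes_py : Prop := ∀ (comparison : List (List (String × String))), Dom_audit_notes_py comparison → Pre_audit_notes_py comparison → Spec_audit_notes_py comparison (audit_notes_py comparison)

-- ===== LEMMAS AND PROOFS =====

-- a space-free pattern that is a prefix of a ++ ' ' :: b is a prefix of a
theorem prefix_of_no_space (t : List Char) (ht : ' ' ∉ t) :
    ∀ (a b : List Char), t <+: a ++ ' ' :: b → t <+: a := by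
  induction t with
  | nil => intro a b _; exact List.nil_prefix
  | cons x t ih =>
    intro a b h
    cases a with
    | nil =>
      exfalso
      rcases h with ⟨v, hv⟩
      simp at hv
      obtain ⟨rfl, -⟩ := hv
      exact ht List.mem_cons_self
    | cons y a =>
      rcases h with ⟨v, hv⟩
      simp at hv
      obtain ⟨rfl, hv⟩ := hv
      rw [List.cons_prefix_cons]
      exact ⟨rfl, ih (fun hm => ht (List.mem_cons_of_mem _ hm)) a b ⟨v, hv⟩⟩

-- a space-free pattern inside a ++ ' ' :: b lies inside a or inside b
theorem infix_split_space (t : List Char) (ht : ' ' ∉ t) :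
    ∀ (a b : List Char), (t <:+: a ++ ' ' :: b ↔ t <:+: a ∨ t <:+: b) := by
  intro a b
  constructor
  · induction a with
    | nil =>
      intro h
      rcases List.infix_cons_iff.mp h with hp | hi
      · cases t with
        | nil => exact Or.inl List.nil_infix
        | cons x t =>
          exfalso
          rcases hp with ⟨v, hv⟩
          simp at hv
          obtain ⟨rfl, -⟩ := hv
          exact ht List.mem_cons_self
      · exact Or.inr hi
    | cons y a ih =>
      intro h
      rcases List.infix_cons_iff.mp h with hp | hi
      · exact Or.inl (prefix_of_no_space t ht (y :: a) b hp).isInfix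
      · rcases ih hi with h1 | h2
        · exact Or.inl (h1.trans (List.suffix_cons y a).isInfix)
        · exact Or.inr h2
  · rintro (h | h)
    · exact h.trans ⟨[], ' ' :: b, rfl⟩
    · exact h.trans ⟨a ++ [' '], [], by simp⟩

-- lowercasing commutes with the space-join
theorem lower_join_space (parts : List (List Char)) :
    PySem.Chars.lower (PySem.Chars.join [' '] parts) = PySem.Chars.join [' '] (parts.map PySem.Chars.lower) := by
  induction parts with
  | nil => simp [PySem.Chars.join_nil, PySem.Chars.lower]
  | cons p rest ih =>
    cases rest with
    | nil => simp [PySem.Chars.join_singleton]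
    | cons q rest' =>
      rw [PySem.Chars.join_cons_cons, List.map_cons, List.map_cons, PySem.Chars.join_cons_cons]
      rw [← List.map_cons, ← ih]
      simp [PySem.Chars.lower, PySem.Chars.lowerChar, PySem.Chars.isupper]

-- a space-free nonempty pattern occurs in the joined blob iff it occurs in some part
theorem infix_join_space (t : List Char) (ht : ' ' ∉ t) (hne : t ≠ []) :
    ∀ (parts : List (List Char)), (t <:+: PySem.Chars.join [' '] parts ↔ ∃ p ∈ parts, t <:+: p) := by
  intro parts
  induction parts with
  | nil =>
    rw [PySem.Chars.join_nil]
    simp [List.infix_nil, hne]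
  | cons p rest ih =>
    cases rest with
    | nil => simp [PySem.Chars.join_singleton]
    | cons q rest' =>
      rw [PySem.Chars.join_cons_cons]
      have : p ++ [' '] ++ PySem.Chars.join [' '] (q :: rest') = p ++ ' ' :: PySem.Chars.join [' '] (q :: rest') := by simp
      rw [this, infix_split_space t ht, ih]
      simp

-- the per-token test on the blob equals the any-per-row test
theorem isIn_blob (tok : String) (ht : ' ' ∉ tok.toList) (hne : tok.toList ≠ [])
    (parts : List String) :
    PySem.Str.isIn tok (PySem.Str.lower (PySem.Str.join " " parts)) =
      parts.any (fun p => PySem.Str.isIn tok (PySem.Str.lower p)) := by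
  rw [Bool.eq_iff_iff, PySem.Str.isIn_iff_infix, PySem.Str.toList_lower, PySem.Str.toList_join]
  have hsep : (" " : String).toList = [' '] := by decide
  rw [hsep, lower_join_space, infix_join_space tok.toList ht hne]
  simp only [List.any_eq_true, PySem.Str.isIn_iff_infix, PySem.Str.toList_lower]
  constructor
  · rintro ⟨p, hp, hinf⟩
    rw [List.mem_map] at hp
    obtain ⟨cs, hcs, rfl⟩ := hp
    rw [List.mem_map] at hcs
    obtain ⟨s, hs, rfl⟩ := hcs
    exact ⟨s, hs, hinf⟩
  · rintro ⟨s, hs, hinf⟩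
    exact ⟨PySem.Chars.lower s.toList, by simp [List.mem_map]; exact ⟨s, hs, rfl⟩, hinf⟩

-- characterization of B's single fold
theorem fold_spec (comparison : List (List (String × String))) :
    ∀ (t r : Bool) (v : Option (List (String × String))),
      comparison.foldl auditStep (t, r, v) =
        (t || comparison.any (fun row =>
            PySem.Str.isIn "trend_not_confirmed" (PySem.Str.lower (pyBlockerGet row))
              || PySem.Str.isIn "countertrend" (PySem.Str.lower (pyBlockerGet row))),
         r || comparison.any (fun row =>
            PySem.Str.isIn "rsi" (PySem.Str.lower (pyBlockerGet row))
              || PySem.Str.isIn "momentum" (PySem.Str.lower (pyBlockerGet row))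
              || PySem.Str.isIn "confidence_too_low" (PySem.Str.lower (pyBlockerGet row))
              || PySem.Str.isIn "reversal_not_eligible" (PySem.Str.lower (pyBlockerGet row))),
         match v with
         | some x => some x
         | none => comparison.find? isReversalRow) := by
  induction comparison with
  | nil => intro t r v; cases v <;> simp
  | cons row rest ih =>
    intro t r v
    rw [List.foldl_cons, ih]
    simp only [auditStep, List.any_cons, List.find?]
    cases v with
    | some x => simp [Bool.or_assoc]
    | none =>
      by_cases h : isReversalRow row <;> simp [h, Bool.or_assoc]

-- ===== VERDICT (by name: the statement is the Claim_ definition above) =====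
-- Bool any distributes over ||
theorem any_or_split {α : Type} (l : List α) (f g : α → Bool) :
    l.any (fun x => f x || g x) = (l.any f || l.any g) := by
  induction l with
  | nil => simp
  | cons x xs ih =>
    simp only [List.any_cons, ih]
    cases f x <;> cases g x <;> simp

theorem audit_notes_py_spec : Claim_equal_audit_notes_py := by
  intro comparison _ _
  unfold Spec_audit_notes_py
  have h1 := isIn_blob "trend_not_confirmed" (by decide) (by decide) (comparison.map pyBlockerGet)
  have h2 := isIn_blob "countertrend" (by decide) (by decide) (comparison.map pyBlockerGet)
  have h3 := isIn_blob "rsi" (by decide) (by decide) (comparison.map pyBlockerGet)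
  have h4 := isIn_blob "momentum" (by decide) (by decide) (comparison.map pyBlockerGet)
  have h5 := isIn_blob "confidence_too_low" (by decide) (by decide) (comparison.map pyBlockerGet)
  have h6 := isIn_blob "reversal_not_eligible" (by decide) (by decide) (comparison.map pyBlockerGet)
  simp only [audit_notes_py, audit_notes_py_alt, fold_spec, h1, h2, h3, h4, h5, h6,
    List.any_map, Function.comp_def, any_or_split, Bool.false_or, Bool.or_assoc]
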